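-- pv_equiv track=rewrite | github.com/openmork/openmork | run_agent.py | _get_messages_up_to_last_assistant
-- ===== SOURCE A (Python) =====
-- from typing import List, Dict, Any, Optional
--
-- def _get_messages_up_to_last_assistant(messages: List[Dict]) -> List[Dict]:
--     """
--     Get messages up to (but not including) the last assistant turn.
--
--     This is used when we need to "roll back" to the last successful point
--     in the conversation, typically when the final assistant message is
--     incomplete or malformed.
--
--     Args:
--         messages: Full message list
--
--     Returns:
--         Messages up to the last complete assistant turn (ending with user/tool message)
--     """
--     if not messages:
--         return []
--
--     # Find the index of the last assistant message
--     last_assistant_idx = None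
--     for i in range(len(messages) - 1, -1, -1):
--         if messages[i].get("role") == "assistant":
--             last_assistant_idx = i
--             break
--
--     if last_assistant_idx is None:
--         # No assistant message found, return all messages
--         return messages.copy()
--
--     # Return everything up to (not including) the last assistant message
--     return messages[:last_assistant_idx]
-- ===== SOURCE B (Python) =====
-- from typing import List, Dict
--
-- def _get_messages_up_to_last_assistant(messages: List[Dict]) -> List[Dict]:
--     # Single forward pass, no indices/slicing: maintain the answer incrementally.
--     # 'before' = everything strictly before the last assistant message seen so far,
--     # 'since'  = the messages from that assistant message onward.
--     before, since, seen = [], [], False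
--     for m in messages:
--         if m.get("role") == "assistant":
--             before = before + since
--             since = [m]
--             seen = True
--         else:
--             since.append(m)
--     return before if seen else messages.copy()
-- ===== Notes on version B (the rewrite author's own statement) =====
-- stated objective: alternative
-- what changed: Replaces A's reverse index scan plus slice by a single forward fold that carries the answer itself: an accumulator pair (messages-before-last-assistant, messages-since) updated per element, with no indices or slicing at all.
import Mathlib
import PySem

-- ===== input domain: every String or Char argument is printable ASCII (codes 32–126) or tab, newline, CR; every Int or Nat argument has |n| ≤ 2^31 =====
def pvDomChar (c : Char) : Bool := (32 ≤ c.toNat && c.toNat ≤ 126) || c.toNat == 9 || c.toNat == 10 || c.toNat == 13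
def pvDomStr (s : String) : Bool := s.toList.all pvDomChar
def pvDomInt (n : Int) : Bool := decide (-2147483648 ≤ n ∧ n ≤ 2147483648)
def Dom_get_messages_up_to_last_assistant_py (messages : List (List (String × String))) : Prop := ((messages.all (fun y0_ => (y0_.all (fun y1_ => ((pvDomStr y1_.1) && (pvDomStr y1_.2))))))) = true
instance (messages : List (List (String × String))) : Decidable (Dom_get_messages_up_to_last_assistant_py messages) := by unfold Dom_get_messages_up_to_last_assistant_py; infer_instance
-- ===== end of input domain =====

-- B replaces A's reverse index scan + slice by one forward fold that carries the answer
-- itself in an accumulator pair (before-last-assistant, since), with no indices or slicing.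

-- ===== PORT A =====
-- A's reverse for-loop with break: recurse over the countdown index list, stop at the
-- first assistant role.  Indices drawn from the range are in bounds, so pyGetD is exact.
def pvAFind (messages : List (List (String × String))) : List Int → Option Int
  | [] => none
  | i :: rest =>
    if (PySem.List.pyGetD messages i []).lookup "role" == some "assistant" then some i
    else pvAFind messages rest

def get_messages_up_to_last_assistant_py (messages : List (List (String × String))) : List (List (String × String)) :=
  if messages = [] then []
  else
    match pvAFind messages (PySem.List.pyRange ((messages.length : Int) - 1) (-1) (-1)) with
    | none => messages
    | some i => PySem.List.slice messages none (some i)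

-- ===== PORT B =====
-- One step of B's forward loop: (before, since, seen) updated per message.
def pvBStep (st : List (List (String × String)) × List (List (String × String)) × Bool)
    (m : List (String × String)) :
    List (List (String × String)) × List (List (String × String)) × Bool :=
  if m.lookup "role" == some "assistant" then (st.1 ++ st.2.1, [m], true)
  else (st.1, st.2.1 ++ [m], st.2.2)

def get_messages_up_to_last_assistant_py_alt (messages : List (List (String × String))) : List (List (String × String)) :=
  let st := messages.foldl pvBStep ([], [], false)
  if st.2.2 then st.1 else messages

-- ===== PRECONDITION & SPEC =====
def Spec_get_messages_up_to_last_assistant_py (messages : List (List (String × String))) (out : List (List (String × String))) : Prop := out = get_messages_up_to_last_assistant_py_alt messages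
instance (messages : List (List (String × String))) (out : List (List (String × String))) : Decidable (Spec_get_messages_up_to_last_assistant_py messages out) := by unfold Spec_get_messages_up_to_last_assistant_py; infer_instance

-- ===== CLAIM (what is proved, stated in full; the proofs are below) =====
def Claim_equal_get_messages_up_to_last_assistant_py : Prop := ∀ (messages : List (List (String × String))), Dom_get_messages_up_to_last_assistant_py messages → Spec_get_messages_up_to_last_assistant_py messages (get_messages_up_to_last_assistant_py messages)

-- ===== LEMMAS AND PROOFS =====

-- Appending one element does not change pvAFind over indices that stay inside the prefix.
theorem pvAFind_append (l : List (List (String × String))) (x : List (String × String))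
    (is : List Int) (h : ∀ i ∈ is, 0 ≤ i ∧ i < (l.length : Int)) :
    pvAFind (l ++ [x]) is = pvAFind l is := by
  induction is with
  | nil => rfl
  | cons i rest ih =>
    have hi := h i (List.mem_cons_self ..)
    have hget : PySem.List.pyGetD (l ++ [x]) i ([] : List (String × String))
        = PySem.List.pyGetD l i [] := by
      rw [PySem.List.pyGetD_eq_getElem _ _ hi.1 (by simp; omega),
          PySem.List.pyGetD_eq_getElem _ _ hi.1 (by exact_mod_cast hi.2)]
      rw [List.getElem_append_left (by omega)]
    simp only [pvAFind, hget]
    split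
    · rfl
    · exact ih (fun j hj => h j (List.mem_cons_of_mem _ hj))

-- B's fold invariant: the two accumulator lists always concatenate back to the input.
theorem pvBFold_inv (l : List (List (String × String))) :
    (l.foldl pvBStep ([], [], false)).1 ++ (l.foldl pvBStep ([], [], false)).2.1 = l := by
  induction l using List.reverseRecOn with
  | nil => rfl
  | append_singleton l x ih =>
    rw [List.foldl_append]
    simp only [List.foldl_cons, List.foldl_nil, pvBStep]
    split
    · exact congrArg (· ++ [x]) ih
    · rw [← List.append_assoc, ih]

-- The fold's 'seen' flag and 'before' list track A's reverse search exactly.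
theorem pvBFold_main (l : List (List (String × String))) :
    ((l.foldl pvBStep ([], [], false)).2.2 = false
      ∧ pvAFind l (PySem.List.pyRange ((l.length : Int) - 1) (-1) (-1)) = none)
    ∨ (∃ i : Int, 0 ≤ i ∧ i < (l.length : Int)
        ∧ pvAFind l (PySem.List.pyRange ((l.length : Int) - 1) (-1) (-1)) = some i
        ∧ (l.foldl pvBStep ([], [], false)).2.2 = true
        ∧ (l.foldl pvBStep ([], [], false)).1 = l.take i.toNat) := by
  induction l using List.reverseRecOn with
  | nil =>
    left
    constructor
    · rfl
    · rw [show ((([] : List (List (String × String))).length : Int) - 1) = -1 by simp]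
      rw [PySem.List.pyRange_neg_one_eq_nil (le_refl (-1))]
      rfl
  | append_singleton l x ih =>
    have hn : ((l ++ [x]).length : Int) - 1 = (l.length : Int) := by simp
    rw [hn, PySem.List.pyRange_neg_one_cons (show (-1:Int) < (l.length:Int) by omega)]
    have hx : PySem.List.pyGetD (l ++ [x]) ((l.length : Int)) ([] : List (String × String)) = x := by
      rw [PySem.List.pyGetD_eq_getElem _ _ (by omega) (by simp)]
      simp
    rw [List.foldl_append]
    simp only [List.foldl_cons, List.foldl_nil, pvAFind, hx, pvBStep]
    by_cases hrole : (x.lookup "role" == some "assistant") = true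
    · rw [if_pos hrole, if_pos hrole]
      right
      refine ⟨(l.length : Int), by omega, by simp, rfl, rfl, ?_⟩
      simp [pvBFold_inv l]
    · rw [if_neg hrole, if_neg hrole]
      rw [pvAFind_append l x _ (fun i hi => by
        have := (PySem.List.mem_pyRange_neg_one).mp hi
        omega)]
      rcases ih with ⟨hseen, hfind⟩ | ⟨i, h0, hlt, hfind, hseen, hbefore⟩
      · left; exact ⟨hseen, hfind⟩
      · right
        refine ⟨i, h0, by simp; omega, hfind, hseen, ?_⟩
        rw [List.take_append_of_le_length (by omega), hbefore]

-- ===== VERDICT (by name: the statement is the Claim_ definition above) =====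
theorem get_messages_up_to_last_assistant_py_spec : Claim_equal_get_messages_up_to_last_assistant_py := by
  intro messages _
  unfold Spec_get_messages_up_to_last_assistant_py
  unfold get_messages_up_to_last_assistant_py get_messages_up_to_last_assistant_py_alt
  by_cases h : messages = []
  · subst h; rfl
  · simp only [if_neg h]
    rcases pvBFold_main messages with ⟨hseen, hfind⟩ | ⟨i, h0, _, hfind, hseen, hbefore⟩
    · rw [hfind, hseen]; rfl
    · rw [hfind, hseen]
      simp [PySem.List.slice_to _ h0, hbefore]
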